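-- pv_equiv track=rewrite | github.com/GlebFrolov-programmer/Diplom | bees/forager_bee.py | search_best_place_in_ambit
-- ===== SOURCE A (Python) =====
-- def search_best_place_in_ambit(places: list):
--     best_place = []
--     min_penalty = min([i for i in (j[-1] for j in places)])
--     for place in places:
--         if min_penalty == place[-1]:
--             best_place = place
--             break
--
--     return best_place
-- ===== SOURCE B (Python) =====
-- def search_best_place_in_ambit(places: list):
--     best_place = places[0]
--     best_penalty = best_place[-1]
--     for place in places[1:]:
--         penalty = place[-1]
--         if penalty < best_penalty:
--             best_place = place
--             best_penalty = penalty
--     return best_place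
-- ===== Notes on version B (the rewrite author's own statement) =====
-- stated objective: simpler
-- what changed: Replaced the two-pass scheme (build the list of last elements, take its min, then rescan for the first match) by a single-pass argmin that keeps the current best place and its penalty, updating on strict < so the first minimum wins.
import Mathlib
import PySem

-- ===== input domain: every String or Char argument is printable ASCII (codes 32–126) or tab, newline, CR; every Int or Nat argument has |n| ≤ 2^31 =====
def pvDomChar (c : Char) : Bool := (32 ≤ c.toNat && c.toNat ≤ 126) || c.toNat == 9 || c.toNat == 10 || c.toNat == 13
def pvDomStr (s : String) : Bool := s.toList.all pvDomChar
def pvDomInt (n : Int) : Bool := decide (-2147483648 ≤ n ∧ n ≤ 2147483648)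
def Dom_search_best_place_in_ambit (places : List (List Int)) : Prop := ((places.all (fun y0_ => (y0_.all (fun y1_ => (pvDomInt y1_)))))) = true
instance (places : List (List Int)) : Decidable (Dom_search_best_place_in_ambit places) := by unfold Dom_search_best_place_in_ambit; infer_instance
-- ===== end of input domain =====

-- ===== PORT A =====
-- B changes A's two-pass min-then-rescan into a single-pass argmin; A raises on empty input or empty places, excluded by Pre_.
-- j[-1] for a nonempty list j (Pre_ guarantees nonemptiness; the getD 0 default is never reached inside Pre_)
def pyLast (j : List Int) : Int := (PySem.List.pyGet? j (-1)).getD 0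

-- the for-loop with break: first place whose last element equals m, else the initial []
def findLoopA (m : Int) : List (List Int) → List Int
  | [] => []
  | p :: rest => if m = pyLast p then p else findLoopA m rest

def search_best_place_in_ambit (places : List (List Int)) : List Int :=
  match PySem.List.min? (places.map pyLast) (fun x => x) with
  | none => []    -- min([]) raises ValueError; excluded by Pre_
  | some m => findLoopA m places

-- ===== PORT B =====
def argminLoop : List (List Int) → List Int → Int → List Int
  | [], best, _ => best
  | p :: rest, best, bp =>
      let pen := pyLast p
      if pen < bp then argminLoop rest p pen else argminLoop rest best bp

def search_best_place_in_ambit_alt (places : List (List Int)) : List Int :=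
  match places with
  | [] => []    -- places[0] raises IndexError; excluded by Pre_
  | b :: rest => argminLoop rest b (pyLast b)

-- ===== PRECONDITION & SPEC =====
-- A raises (ValueError from min([]) on empty places, IndexError from place[-1] on an empty place) exactly outside Pre_.
def Pre_search_best_place_in_ambit (places : List (List Int)) : Prop :=
  places ≠ [] ∧ ∀ p ∈ places, p ≠ []
instance (places : List (List Int)) : Decidable (Pre_search_best_place_in_ambit places) := by unfold Pre_search_best_place_in_ambit; infer_instance
def pvWitness_search_best_place_in_ambit : List (List Int) := [[1, 2], [3, 0], [4, 0]]

def Spec_search_best_place_in_ambit (places : List (List Int)) (out : List Int) : Prop := out = search_best_place_in_ambit_alt places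
instance (places : List (List Int)) (out : List Int) : Decidable (Spec_search_best_place_in_ambit places out) := by unfold Spec_search_best_place_in_ambit; infer_instance

-- ===== CLAIM (what is proved, stated in full; the proofs are below) =====
def Claim_equal_search_best_place_in_ambit : Prop := ∀ (places : List (List Int)), Dom_search_best_place_in_ambit places → Pre_search_best_place_in_ambit places → Spec_search_best_place_in_ambit places (search_best_place_in_ambit places)

-- ===== LEMMAS AND PROOFS =====
theorem foldl_min_le_init (l : List Int) (a : Int) : l.foldl min a ≤ a := by
  induction l generalizing a with
  | nil => simp
  | cons h t ih => exact le_trans (ih (min a h)) (min_le_left a h)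

-- the single-pass argmin equals "find the first place whose last element is the running minimum"
theorem argmin_eq_find (l : List (List Int)) (b : List Int) :
    argminLoop l b (pyLast b) = findLoopA ((l.map pyLast).foldl min (pyLast b)) (b :: l) := by
  induction l generalizing b with
  | nil => simp [argminLoop, findLoopA]
  | cons p rest ih =>
    by_cases h : pyLast p < pyLast b
    · have hmin : min (pyLast b) (pyLast p) = pyLast p := min_eq_right h.le
      have hle : (rest.map pyLast).foldl min (pyLast p) ≤ pyLast p := foldl_min_le_init _ _
      have hne : (rest.map pyLast).foldl min (pyLast p) ≠ pyLast b := by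
        intro he; exact absurd (he ▸ lt_of_le_of_lt hle h) (lt_irrefl _)
      simp only [argminLoop, findLoopA, List.map_cons, List.foldl_cons, hmin, if_pos h,
        if_neg hne]
      exact ih p
  -- keep the current best: b's last is ≤ p's, so p is irrelevant to both sides
    · have hmin : min (pyLast b) (pyLast p) = pyLast b := min_eq_left (not_lt.mp h)
      have hle : (rest.map pyLast).foldl min (pyLast b) ≤ pyLast b := foldl_min_le_init _ _
      simp only [argminLoop, List.map_cons, List.foldl_cons, hmin, if_neg h]
      rw [ih b]
      by_cases he : (rest.map pyLast).foldl min (pyLast b) = pyLast b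
      · simp [findLoopA, he]
      · have hlt : (rest.map pyLast).foldl min (pyLast b) < pyLast b := lt_of_le_of_ne hle he
        have hnp : (rest.map pyLast).foldl min (pyLast b) ≠ pyLast p := by
          intro hx; exact absurd (hx ▸ lt_of_lt_of_le hlt (not_lt.mp h)) (lt_irrefl _)
        simp [findLoopA, he, hnp]

-- ===== VERDICT (by name: the statement is the Claim_ definition above) =====
theorem search_best_place_in_ambit_spec : Claim_equal_search_best_place_in_ambit := by
  intro places _ hpre
  unfold Spec_search_best_place_in_ambit
  match places with
  | [] => exact absurd rfl hpre.1
  | b :: l =>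
    unfold search_best_place_in_ambit search_best_place_in_ambit_alt
    rw [List.map_cons, PySem.List.min?_id_cons]
    show findLoopA _ (b :: l) = argminLoop l b (pyLast b)
    rw [argmin_eq_find, List.foldl_map]
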